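-- pv_equiv track=rewrite | github.com/MaxiLargo/Python | Ejercicio.py | stock_productos
-- ===== SOURCE A (Python) =====
-- def minimotuplas(listatuplas:list[tuple[str,int]],producto:str):
--     valorminimo:int = 0
--     for i,j in listatuplas:
--         if producto == i:
--                 valorminimo=j
--     for i,j in listatuplas:
--          if producto == i:
--               if j<valorminimo:
--                    valorminimo=j
--     return valorminimo
--
-- def maximotuplas(listatuplas:list[tuple[str,int]],producto:str):
--     valormaximo:int = 0
--     for i,j in listatuplas:
--         if producto == i:
--                 valormaximo=j
--     for i,j in listatuplas:
--          if producto == i: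
--               if j>valormaximo:
--                    valormaximo=j
--     return valormaximo
--
-- def stock_productos(stock_cambios:list[tuple[str,int]])->dict[str,tuple[int,int]]:
--     diccionario:dict = {}
--     for producto,stock in stock_cambios:
--          if not producto in diccionario:
--               diccionario[producto]=(minimotuplas(stock_cambios,producto),minimotuplas(stock_cambios,producto))
--          else:
--               diccionario[producto]=(minimotuplas(stock_cambios,producto),maximotuplas(stock_cambios,producto))
--
--     return diccionario
-- ===== SOURCE B (Python) =====
-- def stock_productos(stock_cambios: list[tuple[str, int]]) -> dict[str, tuple[int, int]]:
--     d = {}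
--     for p, s in stock_cambios:
--         prev = d.get(p)
--         if prev is None:
--             d[p] = (s, s)
--         else:
--             d[p] = (min(prev[0], s), max(prev[1], s))
--     return d
-- ===== Notes on version B (the rewrite author's own statement) =====
-- stated objective: faster
-- what changed: Replaces the per-item full rescans (each loop iteration calls helpers that scan the whole list twice) by one single pass that keeps a running (min, max) per product in the dict.
import Mathlib
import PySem

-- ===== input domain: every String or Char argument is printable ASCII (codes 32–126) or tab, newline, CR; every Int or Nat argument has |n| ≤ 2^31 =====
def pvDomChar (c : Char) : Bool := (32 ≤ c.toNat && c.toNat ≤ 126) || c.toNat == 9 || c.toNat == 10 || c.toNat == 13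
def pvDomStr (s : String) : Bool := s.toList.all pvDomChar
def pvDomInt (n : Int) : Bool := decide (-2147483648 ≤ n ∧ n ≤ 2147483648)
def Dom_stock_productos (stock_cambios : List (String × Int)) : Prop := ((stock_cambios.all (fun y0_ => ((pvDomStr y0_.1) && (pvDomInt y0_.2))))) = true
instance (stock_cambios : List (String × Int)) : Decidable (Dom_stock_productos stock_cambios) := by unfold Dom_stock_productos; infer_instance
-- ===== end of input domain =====

-- B replaces A's per-item whole-list rescans (two helper scans per element, O(n^2)) by a
-- single pass keeping a running (min, max) per product in the dict (O(n)); objective: faster.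

-- ===== PORT A =====
def minimotuplas (listatuplas : List (String × Int)) (producto : String) : Int :=
  let valorminimo : Int :=
    listatuplas.foldl (fun valorminimo x => if producto == x.1 then x.2 else valorminimo) 0
  listatuplas.foldl
    (fun valorminimo x =>
      if producto == x.1 then (if x.2 < valorminimo then x.2 else valorminimo) else valorminimo)
    valorminimo

def maximotuplas (listatuplas : List (String × Int)) (producto : String) : Int :=
  let valormaximo : Int :=
    listatuplas.foldl (fun valormaximo x => if producto == x.1 then x.2 else valormaximo) 0
  listatuplas.foldl
    (fun valormaximo x =>
      if producto == x.1 then (if valormaximo < x.2 then x.2 else valormaximo) else valormaximo)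
    valormaximo

def stock_productos (stock_cambios : List (String × Int)) : List (String × Int × Int) :=
  (stock_cambios.foldl
    (fun diccionario x =>
      if diccionario.contains x.1 = false then
        diccionario.insert x.1 (minimotuplas stock_cambios x.1, minimotuplas stock_cambios x.1)
      else
        diccionario.insert x.1 (minimotuplas stock_cambios x.1, maximotuplas stock_cambios x.1))
    PySem.Dict.empty).items

-- ===== PORT B =====
def stock_productos_alt (stock_cambios : List (String × Int)) : List (String × Int × Int) :=
  (stock_cambios.foldl
    (fun d x =>
      match d.get? x.1 with
      | none => d.insert x.1 (x.2, x.2)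
      | some prev => d.insert x.1 (min prev.1 x.2, max prev.2 x.2))
    PySem.Dict.empty).items

-- ===== PRECONDITION & SPEC =====
def Spec_stock_productos (stock_cambios : List (String × Int)) (out : List (String × Int × Int)) : Prop := out = stock_productos_alt stock_cambios
instance (stock_cambios : List (String × Int)) (out : List (String × Int × Int)) : Decidable (Spec_stock_productos stock_cambios out) := by unfold Spec_stock_productos; infer_instance

-- ===== CLAIM (what is proved, stated in full; the proofs are below) =====
def Claim_equal_stock_productos : Prop := ∀ (stock_cambios : List (String × Int)), Dom_stock_productos stock_cambios → Spec_stock_productos stock_cambios (stock_productos stock_cambios)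

-- ===== LEMMAS AND PROOFS =====

/-- The stock values recorded for product `p`, in order. -/
def pvMatches (L : List (String × Int)) (p : String) : List Int :=
  (L.filter (fun x => p == x.1)).map (·.2)

/-- Minimum of the values of `p` (0 if none). -/
def pvMn (L : List (String × Int)) (p : String) : Int :=
  match pvMatches L p with
  | [] => 0
  | v :: vs => vs.foldl min v

/-- Maximum of the values of `p` (0 if none). -/
def pvMx (L : List (String × Int)) (p : String) : Int :=
  match pvMatches L p with
  | [] => 0
  | v :: vs => vs.foldl max v

/-- The distinct products in first-occurrence order. -/
def pvFirsts (L : List (String × Int)) : List String :=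
  L.foldl (fun acc x => if x.1 ∈ acc then acc else acc ++ [x.1]) []

def pvValB (P : List (String × Int)) (p : String) : Int × Int := (pvMn P p, pvMx P p)

def pvValA (L P : List (String × Int)) (p : String) : Int × Int :=
  (minimotuplas L p,
   if 2 ≤ (pvMatches P p).length then maximotuplas L p else minimotuplas L p)

lemma pvMatches_append (L : List (String × Int)) (x : String × Int) (p : String) :
    pvMatches (L ++ [x]) p = pvMatches L p ++ (if p = x.1 then [x.2] else []) := by
  by_cases h : p = x.1 <;> simp [pvMatches, List.filter_append, h]

lemma pvMatches_ne_nil (L : List (String × Int)) (p : String) :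
    pvMatches L p ≠ [] ↔ p ∈ L.map (·.1) := by
  induction L with
  | nil => simp [pvMatches]
  | cons x t ih =>
    by_cases h : p = x.1
    · simp [pvMatches, List.filter_cons, show (p == x.1) = true by simp [h], h]
    · have hm : pvMatches (x :: t) p = pvMatches t p := by
        simp [pvMatches, List.filter_cons, show (p == x.1) = false by simp [h]]
      simp [hm, ih, h]

lemma pvFirsts_aux (L : List (String × Int)) (p : String) :
    ∀ acc, p ∈ L.foldl (fun acc x => if x.1 ∈ acc then acc else acc ++ [x.1]) acc
      ↔ p ∈ acc ∨ p ∈ L.map (·.1) := by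
  induction L with
  | nil => simp
  | cons x t ih =>
    intro acc
    simp only [List.foldl_cons, List.map_cons, List.mem_cons, ih]
    by_cases h : x.1 ∈ acc
    · simp [h]; constructor
      · tauto
      · rintro (h1 | rfl | h2) <;> tauto
    · simp [h]; tauto

lemma mem_pvFirsts (L : List (String × Int)) (p : String) :
    p ∈ pvFirsts L ↔ pvMatches L p ≠ [] := by
  rw [pvMatches_ne_nil, pvFirsts, pvFirsts_aux]; simp

lemma pvFirsts_append (L : List (String × Int)) (x : String × Int) :
    pvFirsts (L ++ [x]) = if x.1 ∈ pvFirsts L then pvFirsts L else pvFirsts L ++ [x.1] := by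
  simp [pvFirsts, List.foldl_append]

lemma pvMn_append_ne (L : List (String × Int)) (x : String × Int) (p : String) (h : p ≠ x.1) :
    pvMn (L ++ [x]) p = pvMn L p := by
  simp [pvMn, pvMatches_append, h]

lemma pvMx_append_ne (L : List (String × Int)) (x : String × Int) (p : String) (h : p ≠ x.1) :
    pvMx (L ++ [x]) p = pvMx L p := by
  simp [pvMx, pvMatches_append, h]

lemma pvMn_append_self_nil (L : List (String × Int)) (k : String) (s : Int)
    (h : pvMatches L k = []) : pvMn (L ++ [(k, s)]) k = s := by
  simp [pvMn, pvMatches_append, h]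

lemma pvMx_append_self_nil (L : List (String × Int)) (k : String) (s : Int)
    (h : pvMatches L k = []) : pvMx (L ++ [(k, s)]) k = s := by
  simp [pvMx, pvMatches_append, h]

lemma pvMn_append_self (L : List (String × Int)) (k : String) (s : Int)
    (h : pvMatches L k ≠ []) : pvMn (L ++ [(k, s)]) k = min (pvMn L k) s := by
  obtain ⟨v, vs, hv⟩ := List.exists_cons_of_ne_nil h
  simp [pvMn, pvMatches_append, hv, List.foldl_append]

lemma pvMx_append_self (L : List (String × Int)) (k : String) (s : Int)
    (h : pvMatches L k ≠ []) : pvMx (L ++ [(k, s)]) k = max (pvMx L k) s := by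
  obtain ⟨v, vs, hv⟩ := List.exists_cons_of_ne_nil h
  simp [pvMx, pvMatches_append, hv, List.foldl_append]

-- folds with min / max

lemma foldl_min_min (l : List Int) : ∀ a b, l.foldl min (min a b) = min a (l.foldl min b) := by
  induction l with
  | nil => intro a b; rfl
  | cons c t ih =>
    intro a b
    simp only [List.foldl_cons]
    rw [min_assoc, ih]

lemma foldl_max_max (l : List Int) : ∀ a b, l.foldl max (max a b) = max a (l.foldl max b) := by
  induction l with
  | nil => intro a b; rfl
  | cons c t ih =>
    intro a b
    simp only [List.foldl_cons]
    rw [max_assoc, ih]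

lemma foldl_min_le_init (l : List Int) : ∀ a, l.foldl min a ≤ a := by
  induction l with
  | nil => intro a; simp
  | cons c t ih =>
    intro a
    simp only [List.foldl_cons]
    exact le_trans (ih (min a c)) (min_le_left _ _)

lemma foldl_max_ge_init (l : List Int) : ∀ a, a ≤ l.foldl max a := by
  induction l with
  | nil => intro a; simp
  | cons c t ih =>
    intro a
    simp only [List.foldl_cons]
    exact le_trans (le_max_left _ _) (ih (max a c))

lemma foldl_min_le_mem (l : List Int) : ∀ a x, x ∈ l → l.foldl min a ≤ x := by
  induction l with
  | nil => simp
  | cons c t ih =>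
    intro a x hx
    simp only [List.foldl_cons]
    rcases List.mem_cons.mp hx with rfl | hx
    · exact le_trans (foldl_min_le_init t _) (min_le_right _ _)
    · exact ih _ _ hx

lemma foldl_max_ge_mem (l : List Int) : ∀ a x, x ∈ l → x ≤ l.foldl max a := by
  induction l with
  | nil => simp
  | cons c t ih =>
    intro a x hx
    simp only [List.foldl_cons]
    rcases List.mem_cons.mp hx with rfl | hx
    · exact le_trans (le_max_right _ _) (foldl_max_ge_init t _)
    · exact ih _ _ hx

-- bridging A's scans to folds over pvMatches

lemma foldl_if_matches (L : List (String × Int)) (p : String) (f : Int → Int → Int) :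
    ∀ a, L.foldl (fun acc x => if p == x.1 then f acc x.2 else acc) a
      = (pvMatches L p).foldl f a := by
  induction L with
  | nil => intro a; rfl
  | cons x t ih =>
    intro a
    rw [List.foldl_cons]
    by_cases h : p = x.1
    · have hm : pvMatches (x :: t) p = x.2 :: pvMatches t p := by
        simp [pvMatches, List.filter_cons, show (p == x.1) = true by simp [h]]
      rw [if_pos (by simp [h]), hm, List.foldl_cons, ih]
    · have hm : pvMatches (x :: t) p = pvMatches t p := by
        simp [pvMatches, List.filter_cons, show (p == x.1) = false by simp [h]]
      rw [if_neg (by simp [h]), hm, ih]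

lemma foldl_last_mem (l : List Int) (h : l ≠ []) :
    ∀ a, l.foldl (fun _ j => j) a ∈ l := by
  induction l with
  | nil => exact absurd rfl h
  | cons x t ih =>
    intro a
    simp only [List.foldl_cons]
    by_cases ht : t = []
    · subst ht; simp
    · exact List.mem_cons_of_mem _ (ih ht x)

lemma minIf_eq_min :
    (fun (acc j : Int) => if j < acc then j else acc) = fun acc j => min acc j := by
  funext a j
  simp only [min_def]
  split_ifs <;> omega

lemma maxIf_eq_max :
    (fun (acc j : Int) => if acc < j then j else acc) = fun acc j => max acc j := by
  funext a j
  simp only [max_def]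
  split_ifs <;> omega

lemma minimotuplas_eq (L : List (String × Int)) (p : String) (h : pvMatches L p ≠ []) :
    minimotuplas L p = pvMn L p := by
  obtain ⟨v, vs, hv⟩ := List.exists_cons_of_ne_nil h
  have h0 : minimotuplas L p
      = (pvMatches L p).foldl (fun acc j => min acc j)
          ((pvMatches L p).foldl (fun _ j => j) 0) := by
    show L.foldl
        (fun acc x => if p == x.1 then (if x.2 < acc then x.2 else acc) else acc)
        (L.foldl (fun acc x => if p == x.1 then x.2 else acc) 0) = _
    rw [foldl_if_matches L p (fun acc j => if j < acc then j else acc),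
      foldl_if_matches L p (fun _ j => j), minIf_eq_min]
  have hmem : (pvMatches L p).foldl (fun _ j => j) 0 ∈ pvMatches L p :=
    foldl_last_mem _ h 0
  set a := (pvMatches L p).foldl (fun _ j => j) 0 with ha
  rw [hv] at h0 hmem
  have : (v :: vs).foldl min a = vs.foldl min v := by
    have step : (v :: vs).foldl min a = min a (vs.foldl min v) := by
      simp only [List.foldl_cons]
      rw [min_comm a v, ← foldl_min_min, min_comm v a]
    rw [step, min_eq_right]
    rcases List.mem_cons.mp hmem with rfl | hmm
    · exact foldl_min_le_init vs a
    · exact foldl_min_le_mem vs v a hmm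
  rw [h0]
  simp only [min] at this ⊢
  rw [this, pvMn, hv]
  rfl

lemma maximotuplas_eq (L : List (String × Int)) (p : String) (h : pvMatches L p ≠ []) :
    maximotuplas L p = pvMx L p := by
  obtain ⟨v, vs, hv⟩ := List.exists_cons_of_ne_nil h
  have h0 : maximotuplas L p
      = (pvMatches L p).foldl (fun acc j => max acc j)
          ((pvMatches L p).foldl (fun _ j => j) 0) := by
    show L.foldl
        (fun acc x => if p == x.1 then (if acc < x.2 then x.2 else acc) else acc)
        (L.foldl (fun acc x => if p == x.1 then x.2 else acc) 0) = _
    rw [foldl_if_matches L p (fun acc j => if acc < j then j else acc),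
      foldl_if_matches L p (fun _ j => j), maxIf_eq_max]
  have hmem : (pvMatches L p).foldl (fun _ j => j) 0 ∈ pvMatches L p :=
    foldl_last_mem _ h 0
  set a := (pvMatches L p).foldl (fun _ j => j) 0 with ha
  rw [hv] at h0 hmem
  have : (v :: vs).foldl max a = vs.foldl max v := by
    have step : (v :: vs).foldl max a = max a (vs.foldl max v) := by
      simp only [List.foldl_cons]
      rw [max_comm a v, ← foldl_max_max, max_comm v a]
    rw [step, max_eq_right]
    rcases List.mem_cons.mp hmem with rfl | hmm
    · exact foldl_max_ge_init vs a
    · exact foldl_max_ge_mem vs v a hmm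
  rw [h0]
  simp only [max] at this ⊢
  rw [this, pvMx, hv]
  rfl

-- dict states whose entries are a function of their key

lemma pvGet?_state (keys : List String) (f : String → Int × Int) (k : String) :
    (PySem.Dict.mk (keys.map (fun p => (p, f p)))).get? k
      = if k ∈ keys then some (f k) else none := by
  induction keys with
  | nil => simp [PySem.Dict.get?]
  | cons q t ih =>
    by_cases h : q = k
    · subst h; simp [PySem.Dict.get?_mk_cons]
    · simp [PySem.Dict.get?_mk_cons, show (q == k) = false by simp [h], ih,
        show ¬k = q by exact fun hk => h hk.symm]

lemma pvInsert_state_mem (keys : List String) (f f' : String → Int × Int) (k : String)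
    (v : Int × Int) (hk : k ∈ keys)
    (h1 : ∀ p ∈ keys, p ≠ k → f' p = f p) (h2 : f' k = v) :
    (PySem.Dict.mk (keys.map (fun p => (p, f p)))).insert k v
      = PySem.Dict.mk (keys.map (fun p => (p, f' p))) := by
  apply PySem.Dict.ext
  have hc : (PySem.Dict.mk (keys.map (fun p => (p, f p)))).contains k = true := by
    rw [PySem.Dict.contains_eq_isSome_get?, pvGet?_state]
    simp [hk]
  rw [PySem.Dict.items_insert_of_contains _ _ hc]
  show (keys.map (fun p => (p, f p))).map _ = _
  rw [List.map_map]
  apply List.map_congr_left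
  intro p hp
  by_cases h : p = k
  · subst h; simp [← h2]
  · simp [Function.comp, show (p == k) = false by simp [h], h1 p hp h]

lemma pvInsert_state_new (keys : List String) (f f' : String → Int × Int) (k : String)
    (v : Int × Int) (hk : k ∉ keys)
    (h1 : ∀ p ∈ keys, f' p = f p) (h2 : f' k = v) :
    (PySem.Dict.mk (keys.map (fun p => (p, f p)))).insert k v
      = PySem.Dict.mk ((keys ++ [k]).map (fun p => (p, f' p))) := by
  apply PySem.Dict.ext
  have hc : (PySem.Dict.mk (keys.map (fun p => (p, f p)))).contains k = false := by
    rw [PySem.Dict.contains_eq_isSome_get?, pvGet?_state]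
    simp [hk]
  rw [PySem.Dict.items_insert_of_not_contains _ _ hc]
  show keys.map (fun p => (p, f p)) ++ [(k, v)] = (keys ++ [k]).map (fun p => (p, f' p))
  rw [List.map_append]
  congr 1
  · apply List.map_congr_left
    intro p hp
    rw [h1 p hp]
  · simp [h2]

-- loop invariants

lemma pvB_inv (t : List (String × Int)) :
    ∀ P : List (String × Int),
      t.foldl
        (fun d x =>
          match d.get? x.1 with
          | none => d.insert x.1 (x.2, x.2)
          | some prev => d.insert x.1 (min prev.1 x.2, max prev.2 x.2))
        (PySem.Dict.mk ((pvFirsts P).map (fun p => (p, pvValB P p))))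
      = PySem.Dict.mk ((pvFirsts (P ++ t)).map (fun p => (p, pvValB (P ++ t) p))) := by
  induction t with
  | nil => intro P; simp
  | cons x t ih =>
    intro P
    have hstep :
        (match (PySem.Dict.mk ((pvFirsts P).map (fun p => (p, pvValB P p)))).get? x.1 with
          | none =>
            (PySem.Dict.mk ((pvFirsts P).map (fun p => (p, pvValB P p)))).insert x.1 (x.2, x.2)
          | some prev =>
            (PySem.Dict.mk ((pvFirsts P).map (fun p => (p, pvValB P p)))).insert x.1
              (min prev.1 x.2, max prev.2 x.2))
        = PySem.Dict.mk ((pvFirsts (P ++ [x])).map (fun p => (p, pvValB (P ++ [x]) p))) := by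
      by_cases hm : x.1 ∈ pvFirsts P
      · have hne : pvMatches P x.1 ≠ [] := (mem_pvFirsts P x.1).mp hm
        rw [pvGet?_state]
        simp only [hm, if_pos]
        rw [pvFirsts_append, if_pos hm]
        apply pvInsert_state_mem _ _ _ _ _ hm
        · intro p hp hpk
          simp [pvValB, pvMn_append_ne _ _ _ hpk, pvMx_append_ne _ _ _ hpk]
        · simp [pvValB, pvMn_append_self P x.1 x.2 hne, pvMx_append_self P x.1 x.2 hne]
      · have hnil : pvMatches P x.1 = [] := by
          by_contra h; exact hm ((mem_pvFirsts P x.1).mpr h)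
        rw [pvGet?_state]
        simp only [hm, if_false]
        rw [pvFirsts_append, if_neg hm]
        apply pvInsert_state_new _ _ _ _ _ hm
        · intro p hp
          have hpk : p ≠ x.1 := fun h => hm (h ▸ hp)
          simp [pvValB, pvMn_append_ne _ _ _ hpk, pvMx_append_ne _ _ _ hpk]
        · simp [pvValB, pvMn_append_self_nil P x.1 x.2 hnil,
            pvMx_append_self_nil P x.1 x.2 hnil]
    rw [List.foldl_cons, hstep, ih (P ++ [x])]
    simp

lemma pvA_inv (L : List (String × Int)) (t : List (String × Int)) :
    ∀ P : List (String × Int),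
      t.foldl
        (fun d x =>
          if d.contains x.1 = false then
            d.insert x.1 (minimotuplas L x.1, minimotuplas L x.1)
          else
            d.insert x.1 (minimotuplas L x.1, maximotuplas L x.1))
        (PySem.Dict.mk ((pvFirsts P).map (fun p => (p, pvValA L P p))))
      = PySem.Dict.mk ((pvFirsts (P ++ t)).map (fun p => (p, pvValA L (P ++ t) p))) := by
  induction t with
  | nil => intro P; simp
  | cons x t ih =>
    intro P
    have hcontains :
        (PySem.Dict.mk ((pvFirsts P).map (fun p => (p, pvValA L P p)))).contains x.1
          = decide (x.1 ∈ pvFirsts P) := by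
      rw [PySem.Dict.contains_eq_isSome_get?, pvGet?_state]
      by_cases hm : x.1 ∈ pvFirsts P <;> simp [hm]
    have hmatches_ne : ∀ p : String, p ≠ x.1 → pvMatches (P ++ [x]) p = pvMatches P p := by
      intro p hpk
      simp [pvMatches_append, hpk]
    have hstep :
        (if (PySem.Dict.mk ((pvFirsts P).map (fun p => (p, pvValA L P p)))).contains x.1 = false
          then (PySem.Dict.mk ((pvFirsts P).map (fun p => (p, pvValA L P p)))).insert x.1
                 (minimotuplas L x.1, minimotuplas L x.1)
          else (PySem.Dict.mk ((pvFirsts P).map (fun p => (p, pvValA L P p)))).insert x.1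
                 (minimotuplas L x.1, maximotuplas L x.1))
        = PySem.Dict.mk ((pvFirsts (P ++ [x])).map (fun p => (p, pvValA L (P ++ [x]) p))) := by
      by_cases hm : x.1 ∈ pvFirsts P
      · have hne : pvMatches P x.1 ≠ [] := (mem_pvFirsts P x.1).mp hm
        rw [hcontains]
        simp only [hm, decide_true]
        rw [if_neg (by simp), pvFirsts_append, if_pos hm]
        apply pvInsert_state_mem _ _ _ _ _ hm
        · intro p hp hpk
          simp [pvValA, hmatches_ne p hpk]
        · have hlen : 2 ≤ (pvMatches (P ++ [x]) x.1).length := by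
            obtain ⟨v, vs, hv⟩ := List.exists_cons_of_ne_nil hne
            have : pvMatches (P ++ [x]) x.1 = pvMatches P x.1 ++ [x.2] := by
              simp [pvMatches_append]
            rw [this, hv]
            simp
          simp [pvValA, hlen]
      · have hnil : pvMatches P x.1 = [] := by
          by_contra h; exact hm ((mem_pvFirsts P x.1).mpr h)
        rw [hcontains]
        simp only [hm, decide_false]
        rw [if_pos trivial, pvFirsts_append, if_neg hm]
        apply pvInsert_state_new _ _ _ _ _ hm
        · intro p hp
          have hpk : p ≠ x.1 := fun h => hm (h ▸ hp)
          simp [pvValA, hmatches_ne p hpk]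
        · have hlen : ¬ 2 ≤ (pvMatches (P ++ [x]) x.1).length := by
            have : pvMatches (P ++ [x]) x.1 = [x.2] := by
              simp [pvMatches_append, hnil]
            rw [this]; simp
          simp [pvValA, hlen]
    rw [List.foldl_cons, hstep, ih (P ++ [x])]
    simp

lemma pvValA_eq_pvValB (L : List (String × Int)) (p : String) (h : pvMatches L p ≠ []) :
    pvValA L L p = pvValB L p := by
  unfold pvValA pvValB
  rw [minimotuplas_eq L p h]
  by_cases hlen : 2 ≤ (pvMatches L p).length
  · rw [if_pos hlen, maximotuplas_eq L p h]
  · rw [if_neg hlen]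
    obtain ⟨v, vs, hv⟩ := List.exists_cons_of_ne_nil h
    have hvs : vs = [] := by
      rw [hv] at hlen
      cases vs with
      | nil => rfl
      | cons w ws =>
        exact absurd (by simp only [List.length_cons]; omega) hlen
    subst hvs
    simp [pvMn, pvMx, hv]

-- ===== VERDICT (by name: the statement is the Claim_ definition above) =====
theorem stock_productos_spec : Claim_equal_stock_productos := by
  intro L _
  unfold Spec_stock_productos stock_productos stock_productos_alt
  conv_lhs => rw [show (PySem.Dict.empty : PySem.Dict String (Int × Int))
      = PySem.Dict.mk ((pvFirsts []).map (fun p => (p, pvValA L [] p))) from rfl]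
  conv_rhs => rw [show (PySem.Dict.empty : PySem.Dict String (Int × Int))
      = PySem.Dict.mk ((pvFirsts []).map (fun p => (p, pvValB [] p))) from rfl]
  rw [pvA_inv L L [], pvB_inv L []]
  simp only [List.nil_append]
  show (List.map _ (pvFirsts L)) = (List.map _ (pvFirsts L))
  apply List.map_congr_left
  intro p hp
  rw [pvValA_eq_pvValB L p ((mem_pvFirsts L p).mp hp)]
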